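-- pv_equiv track=rewrite | github.com/SSteel2/AdventOfCode | 2015/08/8.py | _count_literals
-- ===== SOURCE A (Python) =====
-- def _count_literals(line):
-- 	count = 0
-- 	escape = False
-- 	escaped_hex = 0
-- 	for i in line[1:-1]:
-- 		if escaped_hex > 0:
-- 			escaped_hex -= 1
-- 			continue
-- 		if escape:
-- 			if i == 'x':
-- 				escaped_hex = 2
-- 			escape = False
-- 			continue
-- 		if i == '\\':
-- 			escape = True
-- 		count += 1
-- 	return count
-- ===== SOURCE B (Python) =====
-- def _count_literals(line):
-- 	s = line[1:-1]
-- 	count = 0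
-- 	i = 0
-- 	n = len(s)
-- 	while i < n:
-- 		if s[i] == '\\':
-- 			i += 4 if i + 1 < n and s[i + 1] == 'x' else 2
-- 		else:
-- 			i += 1
-- 		count += 1
-- 	return count
-- ===== Notes on version B (the rewrite author's own statement) =====
-- stated objective: simpler
-- what changed: Replaced the flag-based state machine (escape flag plus escaped_hex countdown updated on every character) with an index-jumping loop that consumes each escape token whole (1, 2 or 4 characters) and counts one per token.
import Mathlib
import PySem

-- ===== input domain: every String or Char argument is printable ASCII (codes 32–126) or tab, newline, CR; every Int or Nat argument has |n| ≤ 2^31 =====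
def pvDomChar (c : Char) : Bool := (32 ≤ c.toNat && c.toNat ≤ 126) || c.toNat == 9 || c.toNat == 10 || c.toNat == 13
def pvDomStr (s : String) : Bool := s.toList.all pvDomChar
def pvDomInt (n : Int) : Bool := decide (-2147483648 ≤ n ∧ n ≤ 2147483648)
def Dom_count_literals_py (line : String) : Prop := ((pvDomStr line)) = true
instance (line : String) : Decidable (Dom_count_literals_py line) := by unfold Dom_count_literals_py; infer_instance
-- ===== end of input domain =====

-- B replaces A's per-character flag state machine by an index-jumping token loop (consume 1, 2 or 4
-- characters per counted token); objective: simpler, same O(n) cost.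

-- ===== PORT A =====
-- the body of A's for-loop as a fold step over the state (count, escape, escaped_hex)
def pvAStep (st : Int × Bool × Int) (c : Char) : Int × Bool × Int :=
  let (count, escape, eh) := st
  if eh > 0 then (count, escape, eh - 1)
  else if escape then (count, false, if c = 'x' then 2 else eh)
  else if c = '\\' then (count + 1, true, eh)
  else (count + 1, escape, eh)

def count_literals_py (line : String) : Int :=
  ((PySem.List.slice line.toList (some 1) (some (-1))).foldl pvAStep (0, false, 0)).1

-- ===== PORT B =====
-- Source B's while-loop: index i jumps by 1, 2 or 4; the fuel argument (= n at the call site) only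
-- totalizes the loop structurally (i gains at least 1 per iteration, so fuel n always suffices)
def pvAltLoop (s : List Char) (n : Nat) : Nat → Nat → Int → Int
  | 0, _, count => count
  | fuel + 1, i, count =>
    if i < n then
      if s.getD i ' ' = '\\' then
        pvAltLoop s n fuel (i + (if i + 1 < n ∧ s.getD (i + 1) ' ' = 'x' then 4 else 2)) (count + 1)
      else
        pvAltLoop s n fuel (i + 1) (count + 1)
    else count

def count_literals_py_alt (line : String) : Int :=
  let s := PySem.List.slice line.toList (some 1) (some (-1))
  pvAltLoop s s.length s.length 0 0

-- ===== PRECONDITION & SPEC =====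
def Spec_count_literals_py (line : String) (out : Int) : Prop := out = count_literals_py_alt line
instance (line : String) (out : Int) : Decidable (Spec_count_literals_py line out) := by unfold Spec_count_literals_py; infer_instance

-- ===== CLAIM (what is proved, stated in full; the proofs are below) =====
def Claim_equal_count_literals_py : Prop := ∀ (line : String), Dom_count_literals_py line → Spec_count_literals_py line (count_literals_py line)

-- ===== LEMMAS AND PROOFS =====

-- reference token count: the decoded length of an escaped string body
def pvTok : List Char → Int
  | [] => 0
  | [_] => 1
  | c :: d :: rest =>
    if c = '\\' then
      if d = 'x' then
        match rest with
        | [] => 1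
        | [_] => 1
        | _ :: _ :: r => 1 + pvTok r
      else 1 + pvTok rest
    else 1 + pvTok (d :: rest)

theorem pvTok_nil : pvTok [] = 0 := rfl

theorem pvTok_cons_ns (c : Char) (h : ¬ c = '\\') (rest : List Char) :
    pvTok (c :: rest) = 1 + pvTok rest := by
  cases rest with
  | nil => rw [pvTok.eq_def]; simp [pvTok_nil]
  | cons d r => rw [pvTok.eq_def]; simp [h]

theorem pvTok_bs_nil : pvTok ['\\'] = 1 := rfl

theorem pvTok_bs_x (r2 : List Char) : pvTok ('\\' :: 'x' :: r2) = 1 + pvTok (r2.drop 2) := by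
  match r2 with
  | [] => rw [pvTok.eq_def]; simp [pvTok_nil]
  | [e] => rw [pvTok.eq_def]; simp [pvTok_nil]
  | e :: f :: r => rw [pvTok.eq_def]; simp

theorem pvTok_bs_nx (d : Char) (h : ¬ d = 'x') (r2 : List Char) :
    pvTok ('\\' :: d :: r2) = 1 + pvTok r2 := by
  rw [pvTok.eq_def]; simp [h]

theorem pvAltLoop_eq_tok (s : List Char) : ∀ (fuel i : Nat) (c : Int), s.length - i ≤ fuel →
    pvAltLoop s s.length fuel i c = c + pvTok (s.drop i) := by
  intro fuel
  induction fuel with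
  | zero =>
    intro i c hk
    rw [pvAltLoop, List.drop_eq_nil_of_le (by omega), pvTok_nil]
    ring
  | succ fuel ih =>
    intro i c hk
    by_cases hin : i < s.length
    · rw [pvAltLoop, if_pos hin]
      have hget : s.getD i ' ' = s[i] := List.getD_eq_getElem s ' ' hin
      have hdrop : s.drop i = s[i] :: s.drop (i + 1) := List.drop_eq_getElem_cons hin
      by_cases hb : s[i] = '\\'
      · rw [hget, if_pos hb]
        by_cases hx : i + 1 < s.length ∧ s.getD (i + 1) ' ' = 'x'
        · rw [if_pos hx]
          obtain ⟨hx1, hx2⟩ := hx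
          have hget1 : s.getD (i + 1) ' ' = s[i + 1] := List.getD_eq_getElem s ' ' hx1
          have hx2' : s[i + 1] = 'x' := by rw [← hget1]; exact hx2
          have hdrop1 : s.drop (i + 1) = s[i + 1] :: s.drop (i + 2) := List.drop_eq_getElem_cons hx1
          have hdd : (s.drop (i + 2)).drop 2 = s.drop (i + 4) := by
            simp [List.drop_drop]
          rw [ih (i + 4) (c + 1) (by omega), hdrop, hdrop1, hb, hx2', pvTok_bs_x, hdd]
          ring
        · rw [if_neg hx, ih (i + 2) (c + 1) (by omega)]
          by_cases h1 : i + 1 < s.length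
          · have hget1 : s.getD (i + 1) ' ' = s[i + 1] := List.getD_eq_getElem s ' ' h1
            have hnx : ¬ s[i + 1] = 'x' := by
              intro hcon
              exact hx ⟨h1, by rw [hget1, hcon]⟩
            have hdrop1 : s.drop (i + 1) = s[i + 1] :: s.drop (i + 2) := List.drop_eq_getElem_cons h1
            rw [hdrop, hdrop1, hb, pvTok_bs_nx _ hnx]
            ring
          · have hd1 : s.drop (i + 1) = [] := List.drop_eq_nil_of_le (by omega)
            have hd2 : s.drop (i + 2) = [] := List.drop_eq_nil_of_le (by omega)
            rw [hdrop, hd1, hd2, hb, pvTok_bs_nil, pvTok_nil]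
            ring
      · rw [hget, if_neg hb, ih (i + 1) (c + 1) (by omega), hdrop, pvTok_cons_ns _ hb]
        ring
    · rw [pvAltLoop, if_neg hin, List.drop_eq_nil_of_le (by omega), pvTok_nil]
      ring

theorem pvFoldlA_eq_tok_aux : ∀ (n : Nat) (s : List Char), s.length ≤ n → ∀ (c : Int),
    (List.foldl pvAStep (c, false, 0) s).1 = c + pvTok s := by
  intro n
  induction n with
  | zero =>
    intro s hs c
    have : s = [] := List.eq_nil_of_length_eq_zero (by omega)
    subst this
    simp [pvTok_nil]
  | succ n ih =>
    intro s hs c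
    cases s with
    | nil => simp [pvTok_nil]
    | cons a rest =>
      by_cases ha : a = '\\'
      · subst ha
        have hstep : pvAStep (c, false, 0) '\\' = (c + 1, true, 0) := by
          simp [pvAStep]
        rw [List.foldl_cons, hstep]
        cases rest with
        | nil => simp [pvTok_bs_nil]
        | cons d r2 =>
          by_cases hd : d = 'x'
          · subst hd
            have hstep2 : pvAStep (c + 1, true, 0) 'x' = (c + 1, false, 2) := by
              simp [pvAStep]
            rw [List.foldl_cons, hstep2]
            cases r2 with
            | nil => simp [pvTok_bs_x, pvTok_nil]
            | cons e r3 =>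
              have hstep3 : pvAStep (c + 1, false, 2) e = (c + 1, false, 1) := by
                simp [pvAStep]
              rw [List.foldl_cons, hstep3]
              cases r3 with
              | nil => simp [pvTok_bs_x, pvTok_nil]
              | cons f r4 =>
                have hstep4 : pvAStep (c + 1, false, 1) f = (c + 1, false, 0) := by
                  simp [pvAStep]
                rw [List.foldl_cons, hstep4, ih r4 (by simp at hs ⊢; omega), pvTok_bs_x]
                have : (e :: f :: r4).drop 2 = r4 := rfl
                rw [this]
                ring
          · have hstep2 : pvAStep (c + 1, true, 0) d = (c + 1, false, 0) := by
              simp [pvAStep, hd]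
            rw [List.foldl_cons, hstep2, ih r2 (by simp at hs ⊢; omega), pvTok_bs_nx _ hd]
            ring
      · have hstep : pvAStep (c, false, 0) a = (c + 1, false, 0) := by
          simp [pvAStep, ha]
        rw [List.foldl_cons, hstep, ih rest (by simp at hs ⊢; omega), pvTok_cons_ns _ ha]
        ring

theorem pvFoldlA_eq_tok (s : List Char) (c : Int) :
    (List.foldl pvAStep (c, false, 0) s).1 = c + pvTok s :=
  pvFoldlA_eq_tok_aux s.length s (le_refl _) c

-- ===== VERDICT (by name: the statement is the Claim_ definition above) =====
theorem count_literals_py_spec : Claim_equal_count_literals_py := by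
  intro line _
  unfold Spec_count_literals_py count_literals_py count_literals_py_alt
  rw [pvFoldlA_eq_tok, pvAltLoop_eq_tok _ _ 0 0 (by omega)]
  simp
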